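-- pv_equiv track=rewrite | github.com/claudlos/Kryptos | strategy2_matrix.py | read_diagonals
-- ===== SOURCE A (Python) =====
-- def read_diagonals(matrix):
--     """Read a matrix diagonally."""
--     rows = len(matrix)
--     cols = len(matrix[0])
--     result = ""
--     for d in range(rows + cols - 1):
--         for r in range(max(0, d - cols + 1), min(rows, d + 1)):
--             c = d - r
--             result += matrix[r][c]
--     return result
-- ===== SOURCE B (Python) =====
-- def read_diagonals(matrix):
--     """Read a matrix diagonally."""
--     rows = len(matrix)
--     cols = len(matrix[0])
--     buckets = [[] for _ in range(rows + cols - 1)]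
--     for r in range(rows):
--         for c in range(cols):
--             buckets[r + c].append(matrix[r][c])
--     return ''.join(s for bucket in buckets for s in bucket)
-- ===== Notes on version B (the rewrite author's own statement) =====
-- stated objective: alternative
-- what changed: Replaces the diagonal-index double loop (with max/min bound computation per diagonal and repeated string concatenation) by a single row-major pass that distributes cells into per-anti-diagonal buckets, then one flattening join.
import Mathlib
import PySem

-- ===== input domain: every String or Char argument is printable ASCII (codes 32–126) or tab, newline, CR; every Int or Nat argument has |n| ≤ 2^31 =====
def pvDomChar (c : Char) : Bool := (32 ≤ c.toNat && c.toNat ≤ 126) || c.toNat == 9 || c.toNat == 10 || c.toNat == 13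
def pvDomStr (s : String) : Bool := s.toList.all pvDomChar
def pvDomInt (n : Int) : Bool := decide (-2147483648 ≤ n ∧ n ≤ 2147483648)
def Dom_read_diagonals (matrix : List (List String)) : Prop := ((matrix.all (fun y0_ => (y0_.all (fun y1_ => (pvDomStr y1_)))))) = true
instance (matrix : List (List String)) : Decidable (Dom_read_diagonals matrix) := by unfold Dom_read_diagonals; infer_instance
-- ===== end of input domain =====

-- B replaces A's diagonal-index double loop by a single row-major pass that distributes cells
-- into per-anti-diagonal buckets followed by one join (objective: alternative traversal, not faster).


-- ===== PORT A =====
def read_diagonals (matrix : List (List String)) : String :=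
  let rows : Int := matrix.length
  let cols : Int := (PySem.List.pyGetD matrix 0 []).length
  (PySem.List.pyRange 0 (rows + cols - 1) 1).foldl
    (fun result d =>
      (PySem.List.pyRange (max 0 (d - cols + 1)) (min rows (d + 1)) 1).foldl
        (fun result r =>
          let c := d - r
          result ++ PySem.List.pyGetD (PySem.List.pyGetD matrix r []) c "")
        result)
    ""

-- ===== PORT B =====
def read_diagonals_alt (matrix : List (List String)) : String :=
  let rows : Nat := matrix.length
  let cols : Nat := (PySem.List.pyGetD matrix 0 []).length
  let buckets0 : List (List String) := List.replicate (rows + cols - 1) []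
  let buckets : List (List String) :=
    (List.range rows).foldl
      (fun bks r =>
        (List.range cols).foldl
          (fun bks c =>
            bks.modify (r + c)
              (fun b => b ++ [PySem.List.pyGetD (PySem.List.pyGetD matrix (r : Int) []) (c : Int) ""]))
          bks)
      buckets0
  String.join buckets.flatten

-- ===== PRECONDITION & SPEC =====
-- Pre_ excludes exactly the inputs on which Python A raises IndexError: the empty matrix
-- (matrix[0]) and matrices in which some row is shorter than the first row (matrix[r][c]).
def Pre_read_diagonals (matrix : List (List String)) : Prop :=
  matrix ≠ [] ∧ ∀ row ∈ matrix, (matrix.headI).length ≤ row.length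
instance (matrix : List (List String)) : Decidable (Pre_read_diagonals matrix) := by
  unfold Pre_read_diagonals; infer_instance
def pvWitness_read_diagonals : List (List String) := [["a", "b"], ["c", "d"]]

def Spec_read_diagonals (matrix : List (List String)) (out : String) : Prop := out = read_diagonals_alt matrix
instance (matrix : List (List String)) (out : String) : Decidable (Spec_read_diagonals matrix out) := by unfold Spec_read_diagonals; infer_instance

-- ===== CLAIM (what is proved, stated in full; the proofs are below) =====
def Claim_equal_read_diagonals : Prop := ∀ (matrix : List (List String)), Dom_read_diagonals matrix → Pre_read_diagonals matrix → Spec_read_diagonals matrix (read_diagonals matrix)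

-- ===== LEMMAS AND PROOFS =====

-- String.join facts (String.append is kernel-opaque, so these are proved once here by induction)
theorem pvJoinFoldl (m : List String) (s : String) :
    m.foldl (· ++ ·) s = s ++ String.join m := by
  induction m generalizing s with
  | nil => simp [show String.join [] = "" from rfl]
  | cons x xs ih =>
      have h : String.join (x :: xs) = x ++ String.join xs := by
        conv_lhs => rw [String.join]
        rw [List.foldl_cons, ih, String.empty_append]
      rw [List.foldl_cons, ih, h, String.append_assoc]

theorem pvJoinCons (x : String) (m : List String) : String.join (x :: m) = x ++ String.join m := by
  conv_lhs => rw [String.join]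
  rw [List.foldl_cons, pvJoinFoldl, String.empty_append]

-- A's 'result += elem' loop is the join of the mapped list
theorem pvStrFoldl {α : Type} (l : List α) (g : α → String) (s : String) :
    l.foldl (fun acc x => acc ++ g x) s = s ++ String.join (l.map g) := by
  induction l generalizing s with
  | nil => simp [show String.join [] = "" from rfl]
  | cons x xs ih => rw [List.foldl_cons, ih, List.map_cons, pvJoinCons, String.append_assoc]

theorem pvJoinAppend (a b : List String) : String.join (a ++ b) = String.join a ++ String.join b := by
  conv_lhs => rw [String.join]
  rw [List.foldl_append, pvJoinFoldl, pvJoinFoldl, String.empty_append]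

theorem pvJoinFlatten (l : List (List String)) :
    String.join l.flatten = String.join (l.map String.join) := by
  induction l with
  | nil => rfl
  | cons x xs ih => rw [List.flatten_cons, pvJoinAppend, List.map_cons, pvJoinCons, ih]

-- effect of B's inner (one-row) pass on bucket d: row k appends exactly to buckets k..k+n-1
theorem pvRowPass (f : Nat → String) (k : Nat) (n : Nat) (bks : List (List String)) (d : Nat) :
    ((List.range n).foldl (fun b c => b.modify (k + c) (fun l => l ++ [f c])) bks)[d]? =
      if k ≤ d ∧ d < k + n then bks[d]?.map (fun l => l ++ [f (d - k)]) else bks[d]? := by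
  induction n with
  | zero => rw [if_neg (by omega)]; rfl
  | succ n ih =>
      rw [List.range_succ, List.foldl_append, List.foldl_cons, List.foldl_nil,
        List.getElem?_modify, ih]
      by_cases hd : k + n = d
      · rw [if_neg (by omega), if_pos (by omega)]
        subst hd
        cases bks[k + n]? with
        | none => rfl
        | some l => simp
      · by_cases hc : k ≤ d ∧ d < k + n
        · rw [if_pos hc, if_pos (by omega)]
          cases bks[d]? with
          | none => rfl
          | some l => simp [hd]
        · rw [if_neg hc, if_neg (by omega)]
          cases bks[d]? with
          | none => rfl
          | some l => simp [hd]

-- bucket d after processing the first t rows: the rows r with 0 ≤ d - r < cols, in increasing r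
theorem pvBuckets (m : Nat → Nat → String) (cols : Nat) (t : Nat) (bks0 : List (List String)) (d : Nat) :
    ((List.range t).foldl
        (fun bks r => (List.range cols).foldl
          (fun b c => b.modify (r + c) (fun l => l ++ [m r c])) bks) bks0)[d]? =
      bks0[d]?.map (fun l => l ++
        (List.range t).filterMap (fun r => if r ≤ d ∧ d < r + cols then some (m r (d - r)) else none)) := by
  induction t with
  | zero =>
      simp only [List.range_zero, List.foldl_nil, List.filterMap_nil]
      cases bks0[d]? with
      | none => rfl
      | some l => simp
  | succ t ih =>
      rw [List.range_succ, List.foldl_append, List.foldl_cons, List.foldl_nil,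
        pvRowPass (m t) t cols _ d, List.filterMap_append]
      by_cases hc : t ≤ d ∧ d < t + cols
      · rw [if_pos hc, ih]
        simp only [List.filterMap_cons, List.filterMap_nil, if_pos hc]
        cases bks0[d]? with
        | none => rfl
        | some l => simp
      · rw [if_neg hc, ih]
        simp only [List.filterMap_cons, List.filterMap_nil, if_neg hc]
        cases bks0[d]? with
        | none => rfl
        | some l => simp

-- an interval filterMap over an initial segment is a map over the interval
theorem pvFilterMapInterval {β : Type} (g : Nat → β) (lo hi : Nat) (n : Nat) :
    (List.range n).filterMap (fun r => if lo ≤ r ∧ r < hi then some (g r) else none)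
      = (List.range' lo (min hi n - lo)).map g := by
  induction n with
  | zero => simp
  | succ n ih =>
      rw [List.range_succ, List.filterMap_append, ih]
      simp only [List.filterMap_cons, List.filterMap_nil]
      by_cases hc : lo ≤ n ∧ n < hi
      · rw [if_pos hc]
        have h1 : min hi (n + 1) - lo = (min hi n - lo) + 1 := by omega
        have h2 : min hi n - lo = n - lo := by omega
        rw [h1, List.range'_concat]
        simp only [List.map_append, List.map_cons, List.map_nil, Nat.one_mul]
        rw [h2, Nat.add_sub_cancel' hc.1]
      · rw [if_neg hc]
        have : min hi (n + 1) - lo = min hi n - lo := by omega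
        rw [this, List.append_nil]

theorem pvMain (matrix : List (List String)) (hne : matrix ≠ []) :
    read_diagonals matrix = read_diagonals_alt matrix := by
  have hR : 1 ≤ matrix.length := List.length_pos_iff.mpr hne
  unfold read_diagonals read_diagonals_alt
  simp only [pvStrFoldl, String.empty_append]
  set C : Nat := (PySem.List.pyGetD matrix 0 []).length with hC
  set R : Nat := matrix.length with hRdef
  -- B side: identify the buckets
  have hbuckets :
      ((List.range R).foldl
        (fun bks r =>
          (List.range C).foldl
            (fun bks c =>
              bks.modify (r + c)
                (fun b => b ++ [PySem.List.pyGetD (PySem.List.pyGetD matrix (r : Int) []) (c : Int) ""]))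
            bks)
        (List.replicate (R + C - 1) ([] : List String)))
      = (List.range (R + C - 1)).map
          (fun d => (List.range R).filterMap
            (fun r => if r ≤ d ∧ d < r + C then
              some (PySem.List.pyGetD (PySem.List.pyGetD matrix (r : Int) []) ((d - r : Nat) : Int) "") else none)) := by
    apply List.ext_getElem?
    intro d
    rw [pvBuckets (fun r c => PySem.List.pyGetD (PySem.List.pyGetD matrix (r : Int) []) (c : Int) "") C R _ d]
    rw [List.getElem?_replicate, List.getElem?_map]
    by_cases hd : d < R + C - 1
    · simp [hd]
    · simp [hd]
  rw [hbuckets, pvJoinFlatten, List.map_map]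
  -- A side: the outer range over the diagonals
  have hN : (R : Int) + (C : Int) - 1 = ((R + C - 1 : Nat) : Int) := by omega
  rw [hN, PySem.List.pyRange_zero_nat, List.map_map]
  apply congrArg String.join
  apply List.map_congr_left
  intro dn hdn
  simp only [Function.comp_apply]
  -- rewrite the A-side inner range bounds into Nat form
  have h1 : max 0 ((dn : Int) - (C : Int) + 1) = ((dn + 1 - C : Nat) : Int) := by omega
  have h2 : min (R : Int) ((dn : Int) + 1) = ((min (dn + 1) R : Nat) : Int) := by omega
  rw [h1, h2, PySem.List.pyRange_one, List.map_map]
  have h3 : (((min (dn + 1) R : Nat) : Int) - ((dn + 1 - C : Nat) : Int)).toNat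
      = min (dn + 1) R - (dn + 1 - C) := by omega
  rw [h3]
  -- B-side inner list as a map over the same interval
  have hcond : (fun r : Nat => if r ≤ dn ∧ dn < r + C then
        some (PySem.List.pyGetD (PySem.List.pyGetD matrix (r : Int) []) ((dn - r : Nat) : Int) "") else none)
      = (fun r : Nat => if dn + 1 - C ≤ r ∧ r < dn + 1 then
        some (PySem.List.pyGetD (PySem.List.pyGetD matrix (r : Int) []) ((dn - r : Nat) : Int) "") else none) := by
    funext r; exact if_congr (by omega) rfl rfl
  rw [hcond, pvFilterMapInterval, List.range'_eq_map_range, List.map_map]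
  apply congrArg String.join
  apply List.map_congr_left
  intro k hk
  rw [List.mem_range] at hk
  simp only [Function.comp_apply]
  have e1 : ((dn + 1 - C : Nat) : Int) + (k : Int) = (((dn + 1 - C) + k : Nat) : Int) := by push_cast; ring
  have e2 : (dn : Int) - ((((dn + 1 - C) + k : Nat)) : Int) = ((dn - ((dn + 1 - C) + k) : Nat) : Int) := by omega
  rw [e1, e2]

-- ===== VERDICT (by name: the statement is the Claim_ definition above) =====
theorem read_diagonals_spec : Claim_equal_read_diagonals := by
  intro matrix _ hPre
  show read_diagonals matrix = read_diagonals_alt matrix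
  exact pvMain matrix hPre.1
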